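-- pv_equiv track=rewrite | github.com/adachel/Python_Start | Tasks/Difficulty_11_20/Task_678/Task_678.py | Calc
-- ===== SOURCE A (Python) =====
-- def Seach(arr):
--     for i in arr:
--         if i == 'a':
--             res = arr.index('a') + 1
--     return res
--
-- def Calc(arr):
--     data = ['a', 'b', 'c']
--     for i in arr:
--         if i == 'A':
--             temp = data.pop(); rev = data[::-1]; data = rev + list(temp)
--             res = Seach(data)
--         if i == 'B':
--             temp = data.pop(0); rev = data[::-1]; data = list(temp) + rev
--             res = Seach(data)
--         if i == 'C':
--             data = data[::-1]
--             res = Seach(data)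
--     return res
-- ===== SOURCE B (Python) =====
-- def Calc(arr):
--     # Track only the index of 'a' (0..2); each op is a transposition of positions.
--     pos = 0
--     for ch in arr:
--         if ch == 'A':              # swap positions 0 and 1
--             if pos < 2:
--                 pos = 1 - pos
--             res = pos + 1
--         elif ch == 'B':            # swap positions 1 and 2
--             if pos > 0:
--                 pos = 3 - pos
--             res = pos + 1
--         elif ch == 'C':            # swap positions 0 and 2
--             pos = 2 - pos
--             res = pos + 1
--     return res
-- ===== Notes on version B (the rewrite author's own statement) =====
-- stated objective: simpler
-- what changed: Instead of popping/reversing/concatenating a 3-element list and re-searching for 'a' with a helper scan, B tracks only the integer position of 'a' and applies each operation as an arithmetic transposition of that position.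
import Mathlib
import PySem

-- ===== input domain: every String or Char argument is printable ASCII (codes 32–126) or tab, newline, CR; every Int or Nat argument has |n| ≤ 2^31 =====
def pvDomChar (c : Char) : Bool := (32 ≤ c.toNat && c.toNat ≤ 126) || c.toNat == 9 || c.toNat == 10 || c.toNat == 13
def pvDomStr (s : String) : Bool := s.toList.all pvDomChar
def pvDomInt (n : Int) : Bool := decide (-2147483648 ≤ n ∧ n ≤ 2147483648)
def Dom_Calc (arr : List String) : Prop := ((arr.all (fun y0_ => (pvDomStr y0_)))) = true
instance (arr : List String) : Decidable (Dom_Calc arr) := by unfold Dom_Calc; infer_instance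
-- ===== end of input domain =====

-- B replaces A's list popping/reversing/searching by tracking only the index of 'a' with
-- three arithmetic transpositions (objective: simpler; return value only — A never mutates arr).

-- ===== PORT A =====
-- Python Seach: res starts unbound (none); each 'a' sets res = arr.index('a') + 1
def Seach (arr : List String) : Option Int :=
  arr.foldl
    (fun res i =>
      if i == "a" then (PySem.List.index? arr "a").map (fun k => ((k : Int) + 1))
      else res)
    none

def CalcStep (st : List String × Option Int) (i : String) : List String × Option Int :=
  let st :=
    if i == "A" then
      -- temp = data.pop(); rev = data[::-1]; data = rev + list(temp)
      match PySem.List.pop? st.1 (-1) with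
      | some (temp, rest) =>
          let rev := (PySem.List.slice? rest none none (-1)).getD []
          let data := rev ++ [temp]   -- list(temp) = [temp]: data's elements are single chars
          (data, Seach data)
      | none => st   -- unreachable: data always has 3 elements, pop never raises
    else st
  let st :=
    if i == "B" then
      -- temp = data.pop(0); rev = data[::-1]; data = list(temp) + rev
      match PySem.List.pop? st.1 0 with
      | some (temp, rest) =>
          let rev := (PySem.List.slice? rest none none (-1)).getD []
          let data := [temp] ++ rev
          (data, Seach data)
      | none => st   -- unreachable as above
    else st
  if i == "C" then
    let data := (PySem.List.slice? st.1 none none (-1)).getD []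
    (data, Seach data)
  else st

-- res = none means Python raises UnboundLocalError; those inputs are excluded by Pre_Calc
def Calc (arr : List String) : Int :=
  ((arr.foldl CalcStep (["a", "b", "c"], none)).2).getD 0

-- ===== PORT B =====
def CalcAltStep (st : Int × Option Int) (ch : String) : Int × Option Int :=
  if ch == "A" then
    let pos := if st.1 < 2 then 1 - st.1 else st.1
    (pos, some (pos + 1))
  else if ch == "B" then
    let pos := if st.1 > 0 then 3 - st.1 else st.1
    (pos, some (pos + 1))
  else if ch == "C" then
    let pos := 2 - st.1
    (pos, some (pos + 1))
  else st

def Calc_alt (arr : List String) : Int :=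
  ((arr.foldl CalcAltStep (0, none)).2).getD 0

-- ===== PRECONDITION & SPEC =====
-- Pre_ excludes inputs containing none of "A"/"B"/"C": there both Pythons raise UnboundLocalError.
def Pre_Calc (arr : List String) : Prop :=
  (arr.any (fun s => s == "A" || s == "B" || s == "C")) = true
instance (arr : List String) : Decidable (Pre_Calc arr) := by unfold Pre_Calc; infer_instance

def pvWitness_Calc : List String := (["A", "x", "C"])

def Spec_Calc (arr : List String) (out : Int) : Prop := out = Calc_alt arr
instance (arr : List String) (out : Int) : Decidable (Spec_Calc arr out) := by unfold Spec_Calc; infer_instance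

-- ===== CLAIM (what is proved, stated in full; the proofs are below) =====
def Claim_equal_Calc : Prop := ∀ (arr : List String), Dom_Calc arr → Pre_Calc arr → Spec_Calc arr (Calc arr)

-- ===== LEMMAS AND PROOFS =====

-- Invariant: same res, and A's data is the permutation of abc with 'a' at B's pos
def CalcInv (a : List String × Option Int) (b : Int × Option Int) : Prop :=
  a.2 = b.2 ∧
    ((a.1 = ["a", "b", "c"] ∧ b.1 = 0) ∨ (a.1 = ["a", "c", "b"] ∧ b.1 = 0) ∨
     (a.1 = ["b", "a", "c"] ∧ b.1 = 1) ∨ (a.1 = ["c", "a", "b"] ∧ b.1 = 1) ∨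
     (a.1 = ["b", "c", "a"] ∧ b.1 = 2) ∨ (a.1 = ["c", "b", "a"] ∧ b.1 = 2))

theorem CalcStep_other (st : List String × Option Int) (i : String)
    (hA : i ≠ "A") (hB : i ≠ "B") (hC : i ≠ "C") : CalcStep st i = st := by
  simp [CalcStep, hA, hB, hC]

theorem CalcAltStep_other (st : Int × Option Int) (i : String)
    (hA : i ≠ "A") (hB : i ≠ "B") (hC : i ≠ "C") : CalcAltStep st i = st := by
  simp [CalcAltStep, hA, hB, hC]

theorem CalcInv_step (a : List String × Option Int) (b : Int × Option Int) (i : String)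
    (h : CalcInv a b) : CalcInv (CalcStep a i) (CalcAltStep b i) := by
  obtain ⟨d, r⟩ := a
  obtain ⟨p, q⟩ := b
  obtain ⟨hres, hperm⟩ := h
  obtain rfl : r = q := hres
  rcases hperm with ⟨rfl, rfl⟩ | ⟨rfl, rfl⟩ | ⟨rfl, rfl⟩ | ⟨rfl, rfl⟩ | ⟨rfl, rfl⟩ | ⟨rfl, rfl⟩ <;>
    (by_cases hA : i = "A"
     · subst hA
       simp [CalcInv, CalcStep, CalcAltStep, Seach, PySem.List.pop?, PySem.List.pyIdx?,
           PySem.List.slice?_none_none_neg_one, PySem.List.index?_eq_idxOf?] <;> decide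
     · by_cases hB : i = "B"
       · subst hB
         simp [CalcInv, CalcStep, CalcAltStep, Seach, PySem.List.pop?, PySem.List.pyIdx?,
           PySem.List.slice?_none_none_neg_one, PySem.List.index?_eq_idxOf?] <;> decide
       · by_cases hC : i = "C"
         · subst hC
           simp [CalcInv, CalcStep, CalcAltStep, Seach, PySem.List.pop?, PySem.List.pyIdx?,
             PySem.List.slice?_none_none_neg_one, PySem.List.index?_eq_idxOf?] <;> decide
         · rw [CalcStep_other _ _ hA hB hC, CalcAltStep_other _ _ hA hB hC]
           exact ⟨rfl, by simp⟩)

theorem CalcInv_foldl (arr : List String) (a : List String × Option Int)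
    (b : Int × Option Int) (h : CalcInv a b) :
    CalcInv (arr.foldl CalcStep a) (arr.foldl CalcAltStep b) := by
  induction arr generalizing a b with
  | nil => exact h
  | cons x xs ih => exact ih _ _ (CalcInv_step a b x h)

-- ===== VERDICT (by name: the statement is the Claim_ definition above) =====
theorem Calc_spec : Claim_equal_Calc := by
  intro arr _ _
  have h := CalcInv_foldl arr (["a", "b", "c"], none) (0, none) (by simp [CalcInv])
  unfold Spec_Calc Calc Calc_alt
  rw [h.1]
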